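-- pv_equiv track=rewrite | github.com/EthanRossmath/Number-Factorer | Factor_Number.py | consolidate_pairs
-- ===== SOURCE A (Python) =====
-- from typing import List, Tuple
--
-- def consolidate_pairs(factor_list: List[Tuple[int, int]]) -> List[Tuple[int, int]]:
--     """
--     Takes a list of pairs of integers [(a_1,n_1), ..., (a_k, n_k)] and consolidates
--     them so that the first entries are unique.
--     """
--     combine_dict = {}
--     for a in factor_list:
--         if a[0] in combine_dict:
--             combine_dict[a[0]] += a[1]
--         else:
--             combine_dict[a[0]] = a[1]
--     combine_list = []
--     for a in combine_dict:
--         combine_list.append((a, combine_dict[a]))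
--
--     combine_list.sort(key=lambda x: x[0])
--     return combine_list
-- ===== SOURCE B (Python) =====
-- from typing import List, Tuple
--
-- def consolidate_pairs(factor_list: List[Tuple[int, int]]) -> List[Tuple[int, int]]:
--     """Sort a copy by key, then merge adjacent runs of equal keys in one scan."""
--     out = []
--     for k, v in sorted(factor_list, key=lambda p: p[0]):
--         if out and out[-1][0] == k:
--             out[-1] = (k, out[-1][1] + v)
--         else:
--             out.append((k, v))
--     return out
-- ===== Notes on version B (the rewrite author's own statement) =====
-- stated objective: alternative
-- what changed: Replaced the dict-accumulate-then-sort-the-items algorithm by sort-the-whole-list-then-merge-adjacent-equal-keys in a single scan (no dict at all).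
import Mathlib
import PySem

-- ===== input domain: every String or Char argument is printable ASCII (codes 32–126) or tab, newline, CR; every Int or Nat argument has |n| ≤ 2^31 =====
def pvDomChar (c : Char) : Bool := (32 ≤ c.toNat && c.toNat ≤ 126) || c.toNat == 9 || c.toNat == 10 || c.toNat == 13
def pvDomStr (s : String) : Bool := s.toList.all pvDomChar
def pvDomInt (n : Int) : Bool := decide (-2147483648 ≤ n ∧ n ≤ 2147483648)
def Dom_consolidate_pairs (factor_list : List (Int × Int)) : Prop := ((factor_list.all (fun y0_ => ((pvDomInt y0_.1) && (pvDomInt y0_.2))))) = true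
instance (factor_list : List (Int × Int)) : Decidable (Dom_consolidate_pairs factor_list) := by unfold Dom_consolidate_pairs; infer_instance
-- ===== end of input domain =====

-- B replaces the dict-accumulate-then-sort algorithm by sort-then-merge-adjacent-runs (alternative algorithm, similar cost).

-- ===== PORT A =====
-- for a in factor_list: if a[0] in d: d[a[0]] += a[1] else: d[a[0]] = a[1]
def consolidate_pairs (factor_list : List (Int × Int)) : List (Int × Int) :=
  let combine_dict : PySem.Dict Int Int :=
    factor_list.foldl
      (fun d a =>
        if d.contains a.1 then d.insert a.1 (d.getD a.1 0 + a.2)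
        else d.insert a.1 a.2)
      PySem.Dict.empty
  -- for a in combine_dict: combine_list.append((a, combine_dict[a]))
  let combine_list : List (Int × Int) :=
    combine_dict.keys.foldl (fun acc a => acc ++ [(a, combine_dict.getD a 0)]) []
  PySem.List.sorted combine_list (fun x => x.1) false

-- ===== PORT B =====
-- one step of B's scan: merge into the last output pair if the key matches, else append
def pvBStep (out : List (Int × Int)) (p : Int × Int) : List (Int × Int) :=
  match out.getLast? with
  | some q => if q.1 == p.1 then out.dropLast ++ [(p.1, q.2 + p.2)] else out ++ [p]
  | none => out ++ [p]

def consolidate_pairs_alt (factor_list : List (Int × Int)) : List (Int × Int) :=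
  (PySem.List.sorted factor_list (fun p => p.1) false).foldl pvBStep []

-- ===== PRECONDITION & SPEC =====
def Spec_consolidate_pairs (factor_list : List (Int × Int)) (out : List (Int × Int)) : Prop := out = consolidate_pairs_alt factor_list
instance (factor_list : List (Int × Int)) (out : List (Int × Int)) : Decidable (Spec_consolidate_pairs factor_list out) := by unfold Spec_consolidate_pairs; infer_instance

-- ===== CLAIM (what is proved, stated in full; the proofs are below) =====
def Claim_equal_consolidate_pairs : Prop := ∀ (factor_list : List (Int × Int)), Dom_consolidate_pairs factor_list → Spec_consolidate_pairs factor_list (consolidate_pairs factor_list)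

-- ===== LEMMAS AND PROOFS =====

-- total value carried by key k in a pair list
def pvSumv (k : Int) (l : List (Int × Int)) : Int :=
  ((l.filter (fun p => p.1 == k)).map (fun p => p.2)).sum

theorem pvSumv_nil (k : Int) : pvSumv k [] = 0 := rfl

theorem pvSumv_cons (k : Int) (p : Int × Int) (l : List (Int × Int)) :
    pvSumv k (p :: l) = (if p.1 = k then p.2 else 0) + pvSumv k l := by
  simp [pvSumv, List.filter_cons]
  split_ifs with h <;> simp_all

theorem pvSumv_perm (k : Int) {l1 l2 : List (Int × Int)} (h : l1.Perm l2) :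
    pvSumv k l1 = pvSumv k l2 := by
  exact ((h.filter _).map _).sum_eq

theorem pvSumv_eq_zero_of_not_mem (k : Int) (l : List (Int × Int))
    (h : k ∉ l.map (fun p => p.1)) : pvSumv k l = 0 := by
  induction l with
  | nil => rfl
  | cons p t ih =>
    simp only [List.map_cons, List.mem_cons, not_or] at h
    rw [pvSumv_cons, if_neg (fun hh => h.1 hh.symm), ih h.2, add_zero]

-- ---- A side ----

theorem pvA_getD (xs : List (Int × Int)) : ∀ (d : PySem.Dict Int Int) (k : Int),
    (xs.foldl
      (fun d a =>
        if d.contains a.1 then d.insert a.1 (d.getD a.1 0 + a.2)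
        else d.insert a.1 a.2)
      d).getD k 0 = d.getD k 0 + pvSumv k xs := by
  induction xs with
  | nil => intro d k; simp [pvSumv_nil]
  | cons p t ih =>
    intro d k
    rw [List.foldl_cons, ih, pvSumv_cons]
    have hstep : (if d.contains p.1 = true then d.insert p.1 (d.getD p.1 0 + p.2)
          else d.insert p.1 p.2).getD k 0
        = if k = p.1 then d.getD p.1 0 + p.2 else d.getD k 0 := by
      by_cases hc : d.contains p.1 = true
      · rw [if_pos hc, PySem.Dict.getD_insert]
      · rw [if_neg hc, PySem.Dict.getD_insert,
          PySem.Dict.getD_of_not_contains (d := d) (k := p.1) (d0 := 0) (by simpa using hc)]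
        simp
    rw [hstep]
    by_cases hk : k = p.1
    · subst hk; simp; ring
    · rw [if_neg hk, if_neg (fun hh => hk hh.symm)]; ring

theorem pvA_keys (xs : List (Int × Int)) :
    (xs.foldl
      (fun d a =>
        if d.contains a.1 then d.insert a.1 (d.getD a.1 0 + a.2)
        else d.insert a.1 a.2)
      PySem.Dict.empty).keys = PySem.Set.ofList (xs.map (fun p => p.1)) := by
  have hf : (fun (d : PySem.Dict Int Int) (a : Int × Int) =>
        if d.contains a.1 then d.insert a.1 (d.getD a.1 0 + a.2)
        else d.insert a.1 a.2)
      = fun d a => d.insert a.1 (if d.contains a.1 then d.getD a.1 0 + a.2 else a.2) := by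
    funext d a; split_ifs <;> rfl
  rw [hf, PySem.Dict.keys_foldl_insert_key]
  rfl

theorem pvFoldl_append (f : Int → Int × Int) (l : List Int) : ∀ (acc : List (Int × Int)),
    l.foldl (fun acc a => acc ++ [f a]) acc = acc ++ l.map f := by
  induction l with
  | nil => simp
  | cons x t ih => intro acc; simp [ih]

-- ---- B side ----

def pvGrpAux (k s : Int) : List (Int × Int) → List (Int × Int)
  | [] => [(k, s)]
  | p :: t => if p.1 == k then pvGrpAux k (s + p.2) t else (k, s) :: pvGrpAux p.1 p.2 t

def pvGrp : List (Int × Int) → List (Int × Int)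
  | [] => []
  | p :: t => pvGrpAux p.1 p.2 t

theorem pvFoldl_bStep (t : List (Int × Int)) : ∀ (A0 : List (Int × Int)) (k s : Int),
    t.foldl pvBStep (A0 ++ [(k, s)]) = A0 ++ pvGrpAux k s t := by
  induction t with
  | nil => intro A0 k s; simp [pvGrpAux]
  | cons p t ih =>
    intro A0 k s
    rw [List.foldl_cons]
    have hlast : (A0 ++ [(k, s)]).getLast? = some (k, s) := by
      simp [List.getLast?_append]
    by_cases h : k = p.1
    · have hb : pvBStep (A0 ++ [(k, s)]) p = A0 ++ [(p.1, s + p.2)] := by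
        simp [pvBStep, h]
      rw [hb, ih]
      simp [pvGrpAux, h]
    · have hb : pvBStep (A0 ++ [(k, s)]) p = (A0 ++ [(k, s)]) ++ [(p.1, p.2)] := by
        simp [pvBStep, hlast, h]
      rw [hb, ih]
      simp [pvGrpAux, show (p.1 == k) = false by simpa using Ne.symm h]
  
theorem pvFoldl_bStep_nil (ys : List (Int × Int)) :
    ys.foldl pvBStep [] = pvGrp ys := by
  cases ys with
  | nil => rfl
  | cons p t =>
    rw [List.foldl_cons]
    have : pvBStep [] p = [] ++ [(p.1, p.2)] := by simp [pvBStep]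
    rw [this, pvFoldl_bStep]
    rfl

theorem pvGrpAux_keys (t : List (Int × Int)) : ∀ (k s key : Int),
    key ∈ (pvGrpAux k s t).map (fun p => p.1) ↔ key = k ∨ key ∈ t.map (fun p => p.1) := by
  induction t with
  | nil => intro k s key; simp [pvGrpAux]
  | cons p t ih =>
    intro k s key
    rw [pvGrpAux]
    by_cases h : p.1 = k
    · simp only [h, beq_self_eq_true, if_true, ih, List.map_cons, List.mem_cons]
      constructor
      · rintro (h1 | h1)
        · exact Or.inl h1
        · exact Or.inr (Or.inr h1)
      · rintro (h1 | h1 | h1)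
        · exact Or.inl h1
        · exact Or.inl (h ▸ h1)
        · exact Or.inr h1
    · simp only [show (p.1 == k) = false by simpa using h, if_neg, Bool.false_eq_true,
        not_false_iff, List.map_cons, List.mem_cons, ih]

theorem pvGrpAux_pairwise (t : List (Int × Int)) : ∀ (k s : Int),
    ((k, s) :: t).Pairwise (fun a b => a.1 ≤ b.1) →
    (pvGrpAux k s t).Pairwise (fun a b => a.1 < b.1) := by
  induction t with
  | nil => intro k s _; simp [pvGrpAux]
  | cons p t ih =>
    intro k s hp
    rw [List.pairwise_cons] at hp
    obtain ⟨hk, hpt⟩ := hp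
    rw [List.pairwise_cons] at hpt
    obtain ⟨hp1, ht⟩ := hpt
    rw [pvGrpAux]
    by_cases h : p.1 = k
    · rw [if_pos (by simpa using h)]
      apply ih
      rw [List.pairwise_cons]
      exact ⟨fun b hb => h ▸ hp1 b hb, ht⟩
    · rw [if_neg (by simpa using h)]
      have hk1 : k < p.1 := lt_of_le_of_ne (hk p (List.mem_cons_self)) (fun hh => h hh.symm)
      rw [List.pairwise_cons]
      refine ⟨?_, ih p.1 p.2 (by rw [List.pairwise_cons]; exact ⟨hp1, ht⟩)⟩
      intro b hb
      have : b.1 = p.1 ∨ b.1 ∈ t.map (fun p => p.1) := by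
        have := (pvGrpAux_keys t p.1 p.2 b.1).mp (List.mem_map_of_mem hb)
        simpa using this
      rcases this with h1 | h1
      · simpa [h1] using hk1
      · obtain ⟨q, hq, hq1⟩ := List.mem_map.mp h1
        calc (k, s).1 < p.1 := hk1
          _ ≤ q.1 := hp1 q hq
          _ = b.1 := hq1

theorem pvGrpAux_values (t : List (Int × Int)) : ∀ (k s : Int),
    ((k, s) :: t).Pairwise (fun a b => a.1 ≤ b.1) →
    ∀ p ∈ pvGrpAux k s t, p = (p.1, pvSumv p.1 ((k, s) :: t)) := by
  induction t with
  | nil =>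
    intro k s _ p hp
    simp only [pvGrpAux, List.mem_singleton] at hp
    subst hp
    simp [pvSumv_cons, pvSumv_nil]
  | cons q t ih =>
    intro k s hp p hmem
    rw [List.pairwise_cons] at hp
    obtain ⟨hk, hpt⟩ := hp
    rw [List.pairwise_cons] at hpt
    obtain ⟨hq1, ht⟩ := hpt
    rw [pvGrpAux] at hmem
    by_cases h : q.1 = k
    · rw [if_pos (by simpa using h)] at hmem
      have := ih k (s + q.2) (by rw [List.pairwise_cons]; exact ⟨fun b hb => h ▸ hq1 b hb, ht⟩) p hmem
      rw [this]
      have : pvSumv p.1 ((k, s + q.2) :: t) = pvSumv p.1 ((k, s) :: q :: t) := by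
        rw [pvSumv_cons, pvSumv_cons, pvSumv_cons, h]
        split_ifs <;> ring
      rw [this]
    · rw [if_neg (by simpa using h)] at hmem
      have hk1 : k < q.1 := lt_of_le_of_ne (hk q (List.mem_cons_self)) (fun hh => h hh.symm)
      rcases List.mem_cons.mp hmem with h1 | h1
      · subst h1
        have hnot : k ∉ (q :: t).map (fun p => p.1) := by
          simp only [List.map_cons, List.mem_cons, not_or]
          refine ⟨ne_of_lt hk1, ?_⟩
          intro hmem2
          obtain ⟨r, hr, hr1⟩ := List.mem_map.mp hmem2
          exact absurd (hr1 ▸ hq1 r hr) (not_le.mpr hk1)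
        simp [pvSumv_cons, pvSumv_eq_zero_of_not_mem _ _ hnot]
      · have := ih q.1 q.2 (by rw [List.pairwise_cons]; exact ⟨hq1, ht⟩) p h1
        have hne : p.1 ≠ k := by
          have hmm : p.1 = q.1 ∨ p.1 ∈ t.map (fun r => r.1) := by
            have := (pvGrpAux_keys t q.1 q.2 p.1).mp (List.mem_map_of_mem h1)
            simpa using this
          rcases hmm with h2 | h2
          · rw [h2]; exact ne_of_gt hk1
          · obtain ⟨r, hr, hr1⟩ := List.mem_map.mp h2
            exact ne_of_gt (lt_of_lt_of_le hk1 (hr1 ▸ hq1 r hr))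
        have hsum : pvSumv p.1 ((k, s) :: q :: t) = pvSumv p.1 ((q.1, q.2) :: t) := by
          rw [pvSumv_cons, if_neg (fun hh => hne hh.symm), zero_add]
        rw [hsum]
        exact this

theorem pvGrp_mem (ys : List (Int × Int)) (hs : ys.Pairwise (fun a b => a.1 ≤ b.1)) (p : Int × Int) :
    p ∈ pvGrp ys ↔ (p.1 ∈ ys.map (fun r => r.1) ∧ p.2 = pvSumv p.1 ys) := by
  cases ys with
  | nil => simp [pvGrp]
  | cons q t =>
    have hq : ((q.1, q.2) :: t).Pairwise (fun a b => a.1 ≤ b.1) := by simpa using hs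
    constructor
    · intro hmem
      have hval := pvGrpAux_values t q.1 q.2 hq p hmem
      have hkey := (pvGrpAux_keys t q.1 q.2 p.1).mp (List.mem_map_of_mem hmem)
      constructor
      · simp only [List.map_cons, List.mem_cons]; simpa using hkey
      · conv_lhs => rw [hval]
    · rintro ⟨hkey, hval⟩
      have : p.1 = q.1 ∨ p.1 ∈ t.map (fun r => r.1) := by simpa using hkey
      have hmem : p.1 ∈ (pvGrpAux q.1 q.2 t).map (fun r => r.1) := by
        rw [pvGrpAux_keys]; exact this
      obtain ⟨r, hr, hr1⟩ := List.mem_map.mp hmem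
      have := pvGrpAux_values t q.1 q.2 hq r hr
      have hpr : p = r := by
        rw [this, hr1]
        exact Prod.ext rfl (by simpa [hr1] using hval)
      exact hpr ▸ hr

theorem pvGrp_pairwise (ys : List (Int × Int)) (hs : ys.Pairwise (fun a b => a.1 ≤ b.1)) :
    (pvGrp ys).Pairwise (fun a b => a.1 < b.1) := by
  cases ys with
  | nil => simp [pvGrp]
  | cons q t => exact pvGrpAux_pairwise t q.1 q.2 (by simpa using hs)

-- uniqueness: two lists strictly sorted on fst with the same members are equal
theorem pvUnique (l1 l2 : List (Int × Int))
    (h1 : l1.Pairwise (fun a b => a.1 < b.1)) (h2 : l2.Pairwise (fun a b => a.1 < b.1))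
    (hm : ∀ p, p ∈ l1 ↔ p ∈ l2) : l1 = l2 := by
  have hn1 : l1.Nodup := h1.imp (fun h => by intro hh; subst hh; exact lt_irrefl _ h)
  have hn2 : l2.Nodup := h2.imp (fun h => by intro hh; subst hh; exact lt_irrefl _ h)
  have hperm : l1.Perm l2 := (List.perm_ext_iff_of_nodup hn1 hn2).mpr hm
  exact List.Perm.eq_of_pairwise
    (fun a b _ _ ha hb => absurd hb (not_lt.mpr (le_of_lt ha))) h1 h2 hperm

-- ===== VERDICT (by name: the statement is the Claim_ definition above) =====
theorem consolidate_pairs_spec : Claim_equal_consolidate_pairs := by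
  intro xs _
  unfold Spec_consolidate_pairs consolidate_pairs consolidate_pairs_alt
  -- canonical form: strictly increasing keys, each with its total value
  set keys := PySem.Set.ofList (xs.map (fun p => p.1)) with hkeysdef
  set skeys := PySem.List.sorted keys (fun x => x) false with hskeys
  set canon := skeys.map (fun k => (k, pvSumv k xs)) with hcanon
  have hsk_lt : skeys.Pairwise (fun a b => a < b) := PySem.List.sorted_ofList_pairwise_lt _
  have hcanon_lt : canon.Pairwise (fun a b => a.1 < b.1) := by
    rw [hcanon]
    exact List.pairwise_map.mpr hsk_lt
  -- A side
  have hA :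
      PySem.List.sorted
        ((List.foldl
          (fun d a =>
            if d.contains a.1 then d.insert a.1 (d.getD a.1 0 + a.2)
            else d.insert a.1 a.2)
          PySem.Dict.empty xs).keys.foldl
            (fun acc a => acc ++ [(a, (List.foldl
              (fun d a =>
                if d.contains a.1 then d.insert a.1 (d.getD a.1 0 + a.2)
                else d.insert a.1 a.2)
              PySem.Dict.empty xs).getD a 0)]) [])
        (fun x => x.1) false = canon := by
    rw [pvFoldl_append, pvA_keys, List.nil_append]
    have hmapeq : keys.map (fun a => (a, (List.foldl
          (fun d a =>
            if d.contains a.1 then d.insert a.1 (d.getD a.1 0 + a.2)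
            else d.insert a.1 a.2)
          PySem.Dict.empty xs).getD a 0)) = keys.map (fun k => (k, pvSumv k xs)) := by
      apply List.map_congr_left
      intro a _
      rw [pvA_getD]
      simp [PySem.Dict.getD_empty]
    rw [hmapeq]
    apply PySem.List.sorted_eq_of_perm_of_pairwise_lt
    · exact (PySem.List.sorted_perm keys (fun x => x) false).map _
    · exact hcanon_lt
  rw [hA]
  -- B side
  set ys := PySem.List.sorted xs (fun p => p.1) false with hys
  have hys_perm : ys.Perm xs := PySem.List.sorted_perm xs (fun p => p.1) false
  have hys_sorted : ys.Pairwise (fun a b => a.1 ≤ b.1) := PySem.List.sorted_pairwise xs _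
  rw [pvFoldl_bStep_nil]
  apply pvUnique canon (pvGrp ys) hcanon_lt (pvGrp_pairwise ys hys_sorted)
  intro p
  rw [pvGrp_mem ys hys_sorted p]
  have hsum : pvSumv p.1 ys = pvSumv p.1 xs := pvSumv_perm _ hys_perm
  have hkeymem : p.1 ∈ ys.map (fun r => r.1) ↔ p.1 ∈ skeys := by
    rw [List.Perm.mem_iff (hys_perm.map _), hskeys, PySem.List.mem_sorted, hkeysdef]
    exact (PySem.Set.mem_ofList _ _).symm
  constructor
  · intro hp
    rw [hcanon] at hp
    obtain ⟨k, hk, hk1⟩ := List.mem_map.mp hp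
    subst hk1
    exact ⟨hkeymem.mpr hk, by rw [hsum]⟩
  · rintro ⟨hk, hv⟩
    rw [hcanon]
    apply List.mem_map.mpr
    exact ⟨p.1, hkeymem.mp hk, by rw [Prod.ext_iff]; exact ⟨rfl, by rw [← hsum, ← hv]⟩⟩
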